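-- pv_equiv track=rewrite | github.com/cxyfer/OJ | UVA/AOAPC-BAC/Ch3/Exercise/UVA-1588_Kickdown.py | f
-- ===== SOURCE A (Python) =====
-- def f(s1, s2): # 固定 s1，移動 s2
--     n1, n2 = len(s1), len(s2)
--     st = 0
--     j = 0
--     while (st + j) < n1 and j < n2:
--         if not (s1[st + j] == '2' and s2[j] == '2'):
--             j += 1
--         else:
--             st += 1
--             j = 0
--     return n1 + n2 - j
-- ===== SOURCE B (Python) =====
-- _TBL = bytes((49 if b == 50 else 48) for b in range(256))  # '2' -> '1', everything else -> '0'
--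
-- def f(s1, s2):
--     n1, n2 = len(s1), len(s2)
--     # bit i of maskK is set iff sK[i] == '2'
--     mask1 = int(s1.encode()[::-1].translate(_TBL), 2) if s1 else 0
--     mask2 = int(s2.encode()[::-1].translate(_TBL), 2) if s2 else 0
--     m = mask1
--     st = 0
--     while m & mask2:
--         m >>= 1
--         st += 1
--     return n1 + n2 - min(n1 - st, n2)
-- ===== Notes on version B (the rewrite author's own statement) =====
-- stated objective: faster
-- what changed: Replaced A's quadratic restart-and-rescan sliding loop by bitmasks of the '2'-positions: build one big integer per string at C speed (translate + int(.,2)) and find the first collision-free shift with one word-packed AND test per shift, then compute the result in closed form from min(n1-st, n2).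
import Mathlib
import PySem

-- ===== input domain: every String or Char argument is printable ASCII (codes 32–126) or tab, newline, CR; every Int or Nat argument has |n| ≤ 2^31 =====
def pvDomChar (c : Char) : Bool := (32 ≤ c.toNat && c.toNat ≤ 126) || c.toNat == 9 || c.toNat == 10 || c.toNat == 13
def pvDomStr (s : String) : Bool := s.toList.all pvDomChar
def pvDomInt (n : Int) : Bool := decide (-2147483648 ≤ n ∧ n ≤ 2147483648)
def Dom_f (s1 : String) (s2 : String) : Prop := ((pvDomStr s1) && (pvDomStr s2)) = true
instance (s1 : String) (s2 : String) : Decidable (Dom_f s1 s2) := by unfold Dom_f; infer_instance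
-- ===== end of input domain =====

-- B replaces A's quadratic shift-and-rescan loop by bitmasks of the '2'-positions:
-- the first collision-free shift is found by AND-testing word-packed masks (objective: faster).

-- ===== PORT A =====
-- A's while loop: state (st, j); advance j on no collision, else st+1 and j:=0; returns final j.
def fLoop (l1 l2 : List Char) (st j : Nat) : Nat :=
  if h : st + j < l1.length ∧ j < l2.length then
    if ¬ (l1.getD (st + j) ' ' = '2' ∧ l2.getD j ' ' = '2') then
      fLoop l1 l2 st (j + 1)
    else
      fLoop l1 l2 (st + 1) 0
  else j
termination_by (l1.length - st, l2.length - j)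
decreasing_by
  · right; omega
  · left; omega

def f (s1 : String) (s2 : String) : Int :=
  let l1 := s1.toList
  let l2 := s2.toList
  ((l1.length : Int) + l2.length) - fLoop l1 l2 0 0

-- ===== PORT B =====
-- mask of '2'-positions: bit i set iff the i-th char is '2' (Source B builds it scanning reversed s).
def pvMask (l : List Char) : Nat :=
  l.foldr (fun c acc => 2 * acc + (if c = '2' then 1 else 0)) 0

-- Source B's `while m & mask2: m >>= 1; st += 1` as a recursion counting the shifts.
def pvShift (m m2 : Nat) : Nat :=
  if m &&& m2 = 0 then 0 else pvShift (m >>> 1) m2 + 1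
termination_by m
decreasing_by
  have hm : m ≠ 0 := by rintro rfl; simp_all
  simp only [Nat.shiftRight_one]
  omega

def f_alt (s1 : String) (s2 : String) : Int :=
  let n1 := s1.toList.length
  let n2 := s2.toList.length
  let st := pvShift (pvMask s1.toList) (pvMask s2.toList)
  ((n1 : Int) + n2) - min ((n1 : Int) - st) (n2 : Int)

-- ===== PRECONDITION & SPEC =====
def Spec_f (s1 : String) (s2 : String) (out : Int) : Prop := out = f_alt s1 s2
instance (s1 : String) (s2 : String) (out : Int) : Decidable (Spec_f s1 s2 out) := by unfold Spec_f; infer_instance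

-- ===== CLAIM (what is proved, stated in full; the proofs are below) =====
def Claim_equal_f : Prop := ∀ (s1 : String) (s2 : String), Dom_f s1 s2 → Spec_f s1 s2 (f s1 s2)

-- ===== LEMMAS AND PROOFS =====

theorem pvMask_lt (l : List Char) : pvMask l < 2 ^ l.length := by
  induction l with
  | nil => simp [pvMask]
  | cons c cs ih =>
    simp only [pvMask, List.foldr] at *
    simp [pow_succ]
    split <;> omega

theorem pvMask_testBit (l : List Char) (i : Nat) :
    (pvMask l).testBit i = true ↔ (i < l.length ∧ l.getD i ' ' = '2') := by
  induction l generalizing i with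
  | nil => simp [pvMask]
  | cons c cs ih =>
    cases i with
    | zero =>
      simp only [pvMask, List.foldr, List.length_cons, List.getD_cons_zero]
      rw [Nat.testBit_zero]
      by_cases hc : c = '2'
      · simp [hc]
      · simp [hc]
    | succ i =>
      simp only [pvMask, List.foldr] at *
      rw [Nat.testBit_succ]
      have hd : (2 * cs.foldr (fun c acc => 2 * acc + (if c = '2' then 1 else 0)) 0
          + (if c = '2' then 1 else 0)) / 2
          = cs.foldr (fun c acc => 2 * acc + (if c = '2' then 1 else 0)) 0 := by
        split <;> omega
      rw [hd]
      rw [ih i]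
      simp

-- collision between s1 shifted by st and s2, stated on the masks
theorem pvShift_mask_zero_iff (l1 l2 : List Char) (st : Nat) :
    ((pvMask l1 >>> st) &&& pvMask l2 = 0) ↔
      ∀ i, ¬ (st + i < l1.length ∧ i < l2.length ∧
        l1.getD (st + i) ' ' = '2' ∧ l2.getD i ' ' = '2') := by
  constructor
  · intro h i hi
    have hb : ((pvMask l1 >>> st) &&& pvMask l2).testBit i = true := by
      rw [Nat.testBit_and, Nat.testBit_shiftRight]
      rw [(pvMask_testBit l1 (st + i)).2 ⟨hi.1, hi.2.2.1⟩,
          (pvMask_testBit l2 i).2 ⟨hi.2.1, hi.2.2.2⟩]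
      rfl
    rw [h] at hb
    simp at hb
  · intro h
    apply Nat.eq_of_testBit_eq
    intro i
    rw [Nat.testBit_and, Nat.testBit_shiftRight, Nat.zero_testBit]
    by_cases h1 : (pvMask l1).testBit (st + i) = true
    · by_cases h2 : (pvMask l2).testBit i = true
      · exfalso
        have a1 := (pvMask_testBit l1 (st + i)).1 h1
        have a2 := (pvMask_testBit l2 i).1 h2
        exact h i ⟨a1.1, a2.1, a1.2, a2.2⟩
      · simp [h2]
    · simp [h1]

theorem pvShift_stops (l1 l2 : List Char) (st : Nat) (hst : st ≤ l1.length) :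
    st + pvShift (pvMask l1 >>> st) (pvMask l2) ≤ l1.length := by
  induction hk : l1.length - st generalizing st with
  | zero =>
    have : st = l1.length := by omega
    subst this
    have h0 : pvMask l1 >>> l1.length = 0 := by
      apply Nat.shiftRight_eq_zero
      exact pvMask_lt l1
    rw [pvShift, h0]
    simp
  | succ k ih =>
    by_cases h : (pvMask l1 >>> st) &&& pvMask l2 = 0
    · rw [pvShift, if_pos h]; omega
    · rw [pvShift, if_neg h]
      have h2 : (pvMask l1 >>> st) >>> 1 = pvMask l1 >>> (st + 1) := by
        rw [← Nat.shiftRight_add]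
      rw [h2]
      have hlt : st < l1.length := by
        by_contra hc
        exact h ((pvShift_mask_zero_iff l1 l2 st).2 (fun i hi => absurd hi.1 (by omega)))
      have := ih (st + 1) (by omega) (by omega)
      omega

-- main loop invariant: with no collision below j and the running bounds,
-- A's loop computes the overlap of the first collision-free shift from st.
-- the terminal case of A's loop: once st+j = n1 or j = n2 with no collision below j,
-- the current shift st is collision-free, so pvShift stops here and j is the overlap.
theorem fLoop_terminal (l1 l2 : List Char) (st j : Nat)
    (hb1 : st + j ≤ l1.length) (hb2 : j ≤ l2.length)
    (hpre : ∀ j' < j, ¬ (l1.getD (st + j') ' ' = '2' ∧ l2.getD j' ' ' = '2'))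
    (hstop : ¬ (st + j < l1.length ∧ j < l2.length)) :
    j = min (l1.length - (st + pvShift (pvMask l1 >>> st) (pvMask l2))) l2.length := by
  have hz : (pvMask l1 >>> st) &&& pvMask l2 = 0 := by
    apply (pvShift_mask_zero_iff l1 l2 st).2
    intro i hi
    by_cases hij : i < j
    · exact hpre i hij ⟨hi.2.2.1, hi.2.2.2⟩
    · omega
  rw [pvShift, if_pos hz]
  omega

theorem fLoop_eq_aux (l1 l2 : List Char) (N : Nat) : ∀ st j,
    (l1.length - st) * (l2.length + 1) + (l2.length - j) ≤ N →
    st + j ≤ l1.length → j ≤ l2.length →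
    (∀ j' < j, ¬ (l1.getD (st + j') ' ' = '2' ∧ l2.getD j' ' ' = '2')) →
    fLoop l1 l2 st j =
      min (l1.length - (st + pvShift (pvMask l1 >>> st) (pvMask l2))) l2.length := by
  induction N with
  | zero =>
    intro st j hN hb1 hb2 hpre
    have hstop : ¬ (st + j < l1.length ∧ j < l2.length) := by
      rintro ⟨h1, h2⟩
      have : 1 ≤ l1.length - st := by omega
      nlinarith
    rw [fLoop, dif_neg hstop]
    exact fLoop_terminal l1 l2 st j hb1 hb2 hpre hstop
  | succ N ih =>
    intro st j hN hb1 hb2 hpre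
    rw [fLoop]
    by_cases hc : st + j < l1.length ∧ j < l2.length
    · rw [dif_pos hc]
      by_cases hcol : l1.getD (st + j) ' ' = '2' ∧ l2.getD j ' ' = '2'
      · rw [if_neg (not_not_intro hcol)]
        have hne : (pvMask l1 >>> st) &&& pvMask l2 ≠ 0 := by
          intro hz
          exact (pvShift_mask_zero_iff l1 l2 st).1 hz j ⟨hc.1, hc.2, hcol.1, hcol.2⟩
        have hmeas : (l1.length - (st + 1)) * (l2.length + 1) + (l2.length - 0) ≤ N := by
          have h1 : l1.length - st = (l1.length - (st + 1)) + 1 := by omega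
          rw [h1, add_mul, one_mul] at hN
          omega
        rw [ih (st + 1) 0 hmeas (by omega) (by omega) (by omega)]
        have hstep : pvShift (pvMask l1 >>> st) (pvMask l2)
            = pvShift (pvMask l1 >>> (st + 1)) (pvMask l2) + 1 := by
          rw [pvShift, if_neg hne, Nat.shiftRight_add]
        omega
      · rw [if_pos hcol]
        have hmeas : (l1.length - st) * (l2.length + 1) + (l2.length - (j + 1)) ≤ N := by
          omega
        apply ih st (j + 1) hmeas (by omega) (by omega)
        intro j' hj'
        by_cases hlt : j' < j
        · exact hpre j' hlt
        · have : j' = j := by omega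
          subst this
          exact hcol
    · rw [dif_neg hc]
      exact fLoop_terminal l1 l2 st j hb1 hb2 hpre hc

theorem fLoop_eq (l1 l2 : List Char) (st j : Nat)
    (hb1 : st + j ≤ l1.length) (hb2 : j ≤ l2.length)
    (hpre : ∀ j' < j, ¬ (l1.getD (st + j') ' ' = '2' ∧ l2.getD j' ' ' = '2')) :
    fLoop l1 l2 st j =
      min (l1.length - (st + pvShift (pvMask l1 >>> st) (pvMask l2))) l2.length :=
  fLoop_eq_aux l1 l2 _ st j le_rfl hb1 hb2 hpre

-- ===== VERDICT (by name: the statement is the Claim_ definition above) =====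
theorem f_spec : Claim_equal_f := by
  intro s1 s2 _
  unfold Spec_f f f_alt
  have h := fLoop_eq s1.toList s2.toList 0 0 (by omega) (by omega) (by omega)
  have hle := pvShift_stops s1.toList s2.toList 0 (by omega)
  rw [Nat.shiftRight_zero] at h hle
  dsimp only
  rw [h]
  omega
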